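-- pv_equiv track=rewrite | github.com/Diyckstra/CP_Configs | CP_SG_config_parser/read_cp_ngfw.py | CP_NGFW_parse_config
-- ===== SOURCE A (Python) =====
-- def CP_NGFW_parse_config(path, config_name, config):
--     parsed_config = {
--         "snmp": [],
--         "arp": [],
--         "interface": [],
--         "static_route": [],
--         "pbr": [],
--         "other": []
--         }
--
--     for line_config in config:
--         if line_config:
--
--             # Comment && empty lines
--             if line_config[0] == '#' or line_config[0] == ' ':
--                 None
--
--             # SNMP
--             elif line_config.find("set snmp ") != -1:
--                 parsed_config["snmp"].append(line_config)
--
--             # ARP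
--             elif line_config.find("add arp proxy ") != -1:
--                 parsed_config["arp"].append(line_config)
--
--             # PBR
--             elif line_config.find("set pbr ") != -1:
--                 parsed_config["pbr"].append(line_config)
--
--             # Static Route
--             elif line_config.find("set static-route ") != -1:
--                 parsed_config["static_route"].append(line_config)
--
--             # Interface
--             elif ((line_config.find("add interface ") != -1) or
--                 (line_config.find("set interface ") != -1) or
--                 (line_config.find("set pim interface ") != -1) or
--                 (line_config.find("set bonding group ") != -1) or
--                 (line_config.find("add bonding group ") != -1) or
--                 (line_config.find("set igmp interface ") != -1)):
--                 parsed_config["interface"].append(line_config)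
--
--             # Other
--             else:
--                 parsed_config["other"].append(line_config)
--
--     return parsed_config
-- ===== SOURCE B (Python) =====
-- def CP_NGFW_parse_config(path, config_name, config):
--     # data-driven dispatch table in the original priority order
--     table = [
--         ("snmp", ["set snmp "]),
--         ("arp", ["add arp proxy "]),
--         ("pbr", ["set pbr "]),
--         ("static_route", ["set static-route "]),
--         ("interface", ["add interface ", "set interface ", "set pim interface ",
--                        "set bonding group ", "add bonding group ", "set igmp interface "]),
--     ]
--
--     def classify(line):
--         if not line or line[0] == '#' or line[0] == ' ':
--             return None
--         for cat, pats in table: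
--             if any(p in line for p in pats):
--                 return cat
--         return "other"
--
--     return {k: [line for line in config if classify(line) == k]
--             for k in ("snmp", "arp", "interface", "static_route", "pbr", "other")}
-- ===== Notes on version B (the rewrite author's own statement) =====
-- stated objective: idiomatic
-- what changed: Replaces the single-pass if/elif cascade that mutates a dict of lists with a pure classify function driven by an ordered (category, patterns) dispatch table, and builds the result as a dict comprehension filtering the config once per category.
import Mathlib
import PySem

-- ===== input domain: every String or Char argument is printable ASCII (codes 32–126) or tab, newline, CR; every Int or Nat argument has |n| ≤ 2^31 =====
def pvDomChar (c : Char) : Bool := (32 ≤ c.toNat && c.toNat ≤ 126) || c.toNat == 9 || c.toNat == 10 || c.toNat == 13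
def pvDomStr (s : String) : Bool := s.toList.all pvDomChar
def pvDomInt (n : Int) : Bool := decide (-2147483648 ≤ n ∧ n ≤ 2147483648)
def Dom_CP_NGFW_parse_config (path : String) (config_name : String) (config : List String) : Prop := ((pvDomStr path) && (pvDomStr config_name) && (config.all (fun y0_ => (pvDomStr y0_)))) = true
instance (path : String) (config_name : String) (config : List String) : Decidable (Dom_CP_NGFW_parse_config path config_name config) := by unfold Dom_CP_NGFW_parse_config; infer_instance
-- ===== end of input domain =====

-- B replaces A's if/elif cascade mutating a dict with a pure table-driven classify
-- function and one filter pass per category (objective: idiomatic; same results).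


-- ===== PORT A =====
-- one step of A's loop body (the if/elif cascade mutating parsed_config)
def pvStepA (d : PySem.Dict String (List String)) (line : String) : PySem.Dict String (List String) :=
  if line != "" then
    if PySem.Str.pyGet? line 0 == some '#' || PySem.Str.pyGet? line 0 == some ' ' then d
    else if PySem.Str.find line "set snmp " != -1 then d.modify "snmp" [] (· ++ [line])
    else if PySem.Str.find line "add arp proxy " != -1 then d.modify "arp" [] (· ++ [line])
    else if PySem.Str.find line "set pbr " != -1 then d.modify "pbr" [] (· ++ [line])
    else if PySem.Str.find line "set static-route " != -1 then d.modify "static_route" [] (· ++ [line])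
    else if (PySem.Str.find line "add interface " != -1) ||
            (PySem.Str.find line "set interface " != -1) ||
            (PySem.Str.find line "set pim interface " != -1) ||
            (PySem.Str.find line "set bonding group " != -1) ||
            (PySem.Str.find line "add bonding group " != -1) ||
            (PySem.Str.find line "set igmp interface " != -1) then d.modify "interface" [] (· ++ [line])
    else d.modify "other" [] (· ++ [line])
  else d

def CP_NGFW_parse_config (path : String) (config_name : String) (config : List String) : List (String × List String) :=
  let parsed_config : PySem.Dict String (List String) :=
    PySem.Dict.ofList [("snmp", []), ("arp", []), ("interface", []), ("static_route", []), ("pbr", []), ("other", [])]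
  (config.foldl pvStepA parsed_config).items

-- ===== PORT B =====
def pvTable : List (String × List String) :=
  [("snmp", ["set snmp "]),
   ("arp", ["add arp proxy "]),
   ("pbr", ["set pbr "]),
   ("static_route", ["set static-route "]),
   ("interface", ["add interface ", "set interface ", "set pim interface ",
                  "set bonding group ", "add bonding group ", "set igmp interface "])]

def pvClassify (line : String) : Option String :=
  if line == "" || PySem.Str.pyGet? line 0 == some '#' || PySem.Str.pyGet? line 0 == some ' ' then none
  else
    match pvTable.find? (fun cp => cp.2.any (fun p => PySem.Str.isIn p line)) with
    | some cp => some cp.1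
    | none => some "other"

def CP_NGFW_parse_config_alt (path : String) (config_name : String) (config : List String) : List (String × List String) :=
  ["snmp", "arp", "interface", "static_route", "pbr", "other"].map
    (fun k => (k, config.filter (fun line => pvClassify line == some k)))

-- ===== PRECONDITION & SPEC =====
def Spec_CP_NGFW_parse_config (path : String) (config_name : String) (config : List String) (out : List (String × List String)) : Prop := out = CP_NGFW_parse_config_alt path config_name config
instance (path : String) (config_name : String) (config : List String) (out : List (String × List String)) : Decidable (Spec_CP_NGFW_parse_config path config_name config out) := by unfold Spec_CP_NGFW_parse_config; infer_instance

-- ===== CLAIM (what is proved, stated in full; the proofs are below) =====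
def Claim_equal_CP_NGFW_parse_config : Prop := ∀ (path : String) (config_name : String) (config : List String), Dom_CP_NGFW_parse_config path config_name config → Spec_CP_NGFW_parse_config path config_name config (CP_NGFW_parse_config path config_name config)

-- ===== LEMMAS AND PROOFS =====
-- Python’s `s.find(sub) != -1` is `sub in s`
lemma pvFind_bne (line sub : String) : (PySem.Str.find line sub != -1) = PySem.Str.isIn sub line := by
  rcases h : PySem.Str.isIn sub line with _ | _
  · have := (PySem.Chars.isIn_eq_false_iff sub.toList line.toList).mp (by simpa using h)
    simp [PySem.Chars.find_eq_neg_one_iff, this]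
  · have := (PySem.Chars.isIn_iff_infix sub.toList line.toList).mp (by simpa using h)
    simp [bne_iff_ne, PySem.Chars.find_ne_neg_one_iff, this]

-- shorthand for the per-category filter that B performs
def pvCat (k : String) (config : List String) : List String :=
  config.filter (fun line => pvClassify line == some k)

lemma pvCat_cons (k : String) (l : String) (rest : List String) :
    pvCat k (l :: rest) = (if pvClassify l == some k then l :: pvCat k rest else pvCat k rest) := by
  simp [pvCat, List.filter_cons]

-- modify on the concrete 6-key accumulator (one lemma per category)
lemma pvModSnmp (s a i r p o : List String) (l : String) :
    (PySem.Dict.mk [("snmp", s), ("arp", a), ("interface", i), ("static_route", r), ("pbr", p), ("other", o)]).modify "snmp" [] (· ++ [l])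
    = PySem.Dict.mk [("snmp", s ++ [l]), ("arp", a), ("interface", i), ("static_route", r), ("pbr", p), ("other", o)] := rfl
lemma pvModArp (s a i r p o : List String) (l : String) :
    (PySem.Dict.mk [("snmp", s), ("arp", a), ("interface", i), ("static_route", r), ("pbr", p), ("other", o)]).modify "arp" [] (· ++ [l])
    = PySem.Dict.mk [("snmp", s), ("arp", a ++ [l]), ("interface", i), ("static_route", r), ("pbr", p), ("other", o)] := rfl
lemma pvModInterface (s a i r p o : List String) (l : String) :
    (PySem.Dict.mk [("snmp", s), ("arp", a), ("interface", i), ("static_route", r), ("pbr", p), ("other", o)]).modify "interface" [] (· ++ [l])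
    = PySem.Dict.mk [("snmp", s), ("arp", a), ("interface", i ++ [l]), ("static_route", r), ("pbr", p), ("other", o)] := rfl
lemma pvModStatic (s a i r p o : List String) (l : String) :
    (PySem.Dict.mk [("snmp", s), ("arp", a), ("interface", i), ("static_route", r), ("pbr", p), ("other", o)]).modify "static_route" [] (· ++ [l])
    = PySem.Dict.mk [("snmp", s), ("arp", a), ("interface", i), ("static_route", r ++ [l]), ("pbr", p), ("other", o)] := rfl
lemma pvModPbr (s a i r p o : List String) (l : String) :
    (PySem.Dict.mk [("snmp", s), ("arp", a), ("interface", i), ("static_route", r), ("pbr", p), ("other", o)]).modify "pbr" [] (· ++ [l])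
    = PySem.Dict.mk [("snmp", s), ("arp", a), ("interface", i), ("static_route", r), ("pbr", p ++ [l]), ("other", o)] := rfl
lemma pvModOther (s a i r p o : List String) (l : String) :
    (PySem.Dict.mk [("snmp", s), ("arp", a), ("interface", i), ("static_route", r), ("pbr", p), ("other", o)]).modify "other" [] (· ++ [l])
    = PySem.Dict.mk [("snmp", s), ("arp", a), ("interface", i), ("static_route", r), ("pbr", p), ("other", o ++ [l])] := rfl

-- loop invariant: A's fold over any 6-key accumulator appends exactly B's filters
lemma pvFoldA (config : List String) (s a i r p o : List String) :
    config.foldl pvStepA (PySem.Dict.mk [("snmp", s), ("arp", a), ("interface", i), ("static_route", r), ("pbr", p), ("other", o)])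
    = PySem.Dict.mk [("snmp", s ++ pvCat "snmp" config), ("arp", a ++ pvCat "arp" config),
        ("interface", i ++ pvCat "interface" config), ("static_route", r ++ pvCat "static_route" config),
        ("pbr", p ++ pvCat "pbr" config), ("other", o ++ pvCat "other" config)] := by
  induction config generalizing s a i r p o with
  | nil => simp [pvCat]
  | cons line rest ih =>
    simp only [List.foldl_cons]
    by_cases he : line = ""
    · have hstep : ∀ d : PySem.Dict String (List String), pvStepA d line = d := by
        intro d; simp [pvStepA, he]
      have hclassify : pvClassify line = none := by simp [pvClassify, he]
      simp [hstep, pvCat_cons, hclassify, ih]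
    · have hne : (line != "") = true := by simp [he]
      by_cases hH : PySem.List.pyGet? line.toList 0 = some '#'
      · have hstep : ∀ d : PySem.Dict String (List String), pvStepA d line = d := by
          intro d; unfold pvStepA; rw [if_pos hne, if_pos (by simp [hH])]
        have hclassify : pvClassify line = none := by
          unfold pvClassify; rw [if_pos (by simp [hH])]
        simp [hstep, pvCat_cons, hclassify, ih]
      by_cases hS : PySem.List.pyGet? line.toList 0 = some ' '
      · have hstep : ∀ d : PySem.Dict String (List String), pvStepA d line = d := by
          intro d; unfold pvStepA; rw [if_pos hne, if_pos (by simp [hS])]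
        have hclassify : pvClassify line = none := by
          unfold pvClassify; rw [if_pos (by simp [hS])]
        simp [hstep, pvCat_cons, hclassify, ih]
      · have hclassify : pvClassify line =
            (if PySem.Str.isIn "set snmp " line then some "snmp"
             else if PySem.Str.isIn "add arp proxy " line then some "arp"
             else if PySem.Str.isIn "set pbr " line then some "pbr"
             else if PySem.Str.isIn "set static-route " line then some "static_route"
             else if (PySem.Str.isIn "add interface " line || PySem.Str.isIn "set interface " line ||
                      PySem.Str.isIn "set pim interface " line || PySem.Str.isIn "set bonding group " line ||
                      PySem.Str.isIn "add bonding group " line || PySem.Str.isIn "set igmp interface " line) then some "interface"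
             else some "other") := by
          unfold pvClassify
          rw [if_neg (by simp [he, hH, hS])]
          simp only [pvTable, List.find?]
          split_ifs <;> simp_all <;>
            (rcases ‹_ ∨ _› with ((((h | h) | h) | h) | h) | h <;> simp [h])
        have hstep : ∀ d : PySem.Dict String (List String), pvStepA d line =
            (if PySem.Str.isIn "set snmp " line then d.modify "snmp" [] (· ++ [line])
             else if PySem.Str.isIn "add arp proxy " line then d.modify "arp" [] (· ++ [line])
             else if PySem.Str.isIn "set pbr " line then d.modify "pbr" [] (· ++ [line])
             else if PySem.Str.isIn "set static-route " line then d.modify "static_route" [] (· ++ [line])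
             else if (PySem.Str.isIn "add interface " line || PySem.Str.isIn "set interface " line ||
                      PySem.Str.isIn "set pim interface " line || PySem.Str.isIn "set bonding group " line ||
                      PySem.Str.isIn "add bonding group " line || PySem.Str.isIn "set igmp interface " line) then d.modify "interface" [] (· ++ [line])
             else d.modify "other" [] (· ++ [line])) := by
          intro d
          unfold pvStepA
          rw [if_pos hne, if_neg (by simp [hH, hS])]
          simp only [pvFind_bne]
        simp only [hstep]
        split_ifs with h1 h2 h3 h4 h5
        · have hcls : pvClassify line = some "snmp" := by rw [hclassify, if_pos h1]
          rw [pvModSnmp, ih]; simp [pvCat_cons, hcls]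
        · have hcls : pvClassify line = some "arp" := by rw [hclassify, if_neg (by simpa using h1), if_pos h2]
          rw [pvModArp, ih]; simp [pvCat_cons, hcls]
        · have hcls : pvClassify line = some "pbr" := by
            rw [hclassify, if_neg (by simpa using h1), if_neg (by simpa using h2), if_pos h3]
          rw [pvModPbr, ih]; simp [pvCat_cons, hcls]
        · have hcls : pvClassify line = some "static_route" := by
            rw [hclassify, if_neg (by simpa using h1), if_neg (by simpa using h2), if_neg (by simpa using h3), if_pos h4]
          rw [pvModStatic, ih]; simp [pvCat_cons, hcls]
        · have hcls : pvClassify line = some "interface" := by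
            rw [hclassify, if_neg (by simpa using h1), if_neg (by simpa using h2), if_neg (by simpa using h3),
              if_neg (by simpa using h4), if_pos h5]
          rw [pvModInterface, ih]; simp [pvCat_cons, hcls]
        · have hcls : pvClassify line = some "other" := by
            rw [hclassify, if_neg (by simpa using h1), if_neg (by simpa using h2), if_neg (by simpa using h3),
              if_neg (by simpa using h4), if_neg (by simpa using h5)]
          rw [pvModOther, ih]; simp [pvCat_cons, hcls]

-- ===== VERDICT (by name: the statement is the Claim_ definition above) =====
theorem CP_NGFW_parse_config_spec : Claim_equal_CP_NGFW_parse_config := by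
  intro path config_name config _
  show _ = _
  have hinit : (PySem.Dict.ofList [("snmp", ([] : List String)), ("arp", []), ("interface", []), ("static_route", []), ("pbr", []), ("other", [])])
      = PySem.Dict.mk [("snmp", []), ("arp", []), ("interface", []), ("static_route", []), ("pbr", []), ("other", [])] := by decide
  simp only [CP_NGFW_parse_config, hinit, pvFoldA]
  simp [CP_NGFW_parse_config_alt, pvCat]
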